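-- pv_equiv track=rewrite | github.com/nishantchauhan00/GeeksForGeeks | Companies Question/71 Match specific pattern.py | findSpecificPattern1
-- ===== SOURCE A (Python) =====
-- def getPattern(inpstr, n):
--     j, pattern = 1, [1]
--     for i in range(1, n):
--         if inpstr[i] == inpstr[i - 1]:
--             pattern[-1] += 1
--         else:
--             j += 1
--             pattern.append(j)
--     return pattern
--
-- def findSpecificPattern1(arr, matchstr):
--     out = []
--     n = len(matchstr)
--     matching_pattern = getPattern(matchstr, n)
--     for el in arr:
--         if not (len(el) == n):
--             continue
--         elif matching_pattern == getPattern(el, n):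
--             out.append(el)
--     return out
-- ===== SOURCE B (Python) =====
-- def findSpecificPattern1(arr, matchstr):
--     # No signature is built: each element is compared directly against matchstr
--     # by checking that every adjacent position breaks/continues a run in both.
--     n = len(matchstr)
--
--     def ok(el):
--         return len(el) == n and all(
--             (el[i] == el[i - 1]) == (matchstr[i] == matchstr[i - 1])
--             for i in range(1, n))
--
--     return list(filter(ok, arr))
-- ===== Notes on version B (the rewrite author's own statement) =====
-- stated objective: alternative
-- what changed: A builds an encoded pattern list (a cumulative-counter signature) for the reference and for every element and compares the lists; B builds no signature at all: it compares each element directly against matchstr, checking with all() over adjacent index pairs that a run continues/breaks at the same positions in both strings.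
import Mathlib
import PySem

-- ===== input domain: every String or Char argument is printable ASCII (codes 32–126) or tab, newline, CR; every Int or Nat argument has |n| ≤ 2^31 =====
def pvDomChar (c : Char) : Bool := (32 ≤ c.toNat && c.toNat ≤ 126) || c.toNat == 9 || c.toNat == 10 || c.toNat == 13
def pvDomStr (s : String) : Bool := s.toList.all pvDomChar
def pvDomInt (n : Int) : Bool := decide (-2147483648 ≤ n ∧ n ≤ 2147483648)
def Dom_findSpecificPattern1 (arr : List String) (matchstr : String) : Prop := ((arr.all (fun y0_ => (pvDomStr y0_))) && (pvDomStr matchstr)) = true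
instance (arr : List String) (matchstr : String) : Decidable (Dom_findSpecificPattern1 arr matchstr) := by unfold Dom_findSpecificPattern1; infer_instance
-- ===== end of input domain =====

-- B builds no pattern/signature list at all: it compares each element directly against
-- matchstr position by position (adjacent-equality check); alternative decomposition, same cost.

-- ===== PORT A =====
-- pattern[-1] += 1  (pattern is always nonempty in A, so the [] case is unreachable)
def incLast : List Int → List Int
  | [] => []
  | [x] => [x + 1]
  | x :: y :: xs => x :: incLast (y :: xs)

-- loop body of getPattern; string indexing is pyGet? on toList; both indices i and i-1
-- are in range for every i drawn from range(1, n) with n = len(inpstr), so comparing the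
-- Options equals comparing the characters (Python never raises here).
def stepA (cs : List Char) (st : Int × List Int) (i : Int) : Int × List Int :=
  if PySem.List.pyGet? cs i == PySem.List.pyGet? cs (i - 1) then (st.1, incLast st.2)
  else (st.1 + 1, st.2 ++ [st.1 + 1])

def getPattern (inpstr : String) (n : Int) : List Int :=
  ((PySem.List.pyRange 1 n 1).foldl (stepA inpstr.toList) (1, [1])).2

def findSpecificPattern1 (arr : List String) (matchstr : String) : List String :=
  let n : Int := PySem.Str.len matchstr
  let matchingPattern := getPattern matchstr n
  arr.foldl (fun out el =>
    if ¬ (PySem.Str.len el == n) then out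
    else if matchingPattern == getPattern el n then out ++ [el]
    else out) []

-- ===== PORT B =====
-- the generator's per-index test: (el[i] == el[i-1]) == (matchstr[i] == matchstr[i-1]);
-- all indices drawn from range(1, n) are in range for both strings of length n
def stepB (es ms : List Char) (i : Int) : Bool :=
  (PySem.List.pyGet? es i == PySem.List.pyGet? es (i - 1))
    == (PySem.List.pyGet? ms i == PySem.List.pyGet? ms (i - 1))

def findSpecificPattern1_alt (arr : List String) (matchstr : String) : List String :=
  let n : Int := PySem.Str.len matchstr
  arr.filter (fun el =>
    PySem.Str.len el == n
      && (PySem.List.pyRange 1 n 1).all (stepB el.toList matchstr.toList))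

-- ===== PRECONDITION & SPEC =====
def Spec_findSpecificPattern1 (arr : List String) (matchstr : String) (out : List String) : Prop := out = findSpecificPattern1_alt arr matchstr
instance (arr : List String) (matchstr : String) (out : List String) : Decidable (Spec_findSpecificPattern1 arr matchstr out) := by unfold Spec_findSpecificPattern1; infer_instance

-- ===== CLAIM (what is proved, stated in full; the proofs are below) =====
def Claim_equal_findSpecificPattern1 : Prop := ∀ (arr : List String) (matchstr : String), Dom_findSpecificPattern1 arr matchstr → Spec_findSpecificPattern1 arr matchstr (findSpecificPattern1 arr matchstr)

-- ===== LEMMAS AND PROOFS =====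

-- proof-side run-length encoding: both A's pattern and B's adjacency check are
-- characterised through the list of run lengths
def runsBAux (acc : List Int) : List Char → List Int
  | [] => acc
  | c :: cs =>
      runsBAux (acc ++ [(1 : Int) + (cs.takeWhile (fun x => x == c)).length])
        (cs.dropWhile (fun x => x == c))
  termination_by l => l.length
  decreasing_by simpa using Nat.lt_succ_of_le (List.length_dropWhile_le _ _)

def runsB (cs : List Char) : List Int := runsBAux [] cs

theorem runsBAux_acc (n : Nat) :
    ∀ (l : List Char), l.length ≤ n → ∀ (acc : List Int), runsBAux acc l = acc ++ runsBAux [] l := by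
  induction n with
  | zero =>
      intro l hl acc
      rw [List.length_eq_zero_iff.mp (Nat.le_zero.mp hl)]
      simp [runsBAux]
  | succ n ih =>
      intro l hl acc
      cases l with
      | nil => simp [runsBAux]
      | cons c cs =>
          have hd : (cs.dropWhile (fun x => x == c)).length ≤ n := by
            have := List.length_dropWhile_le (fun x => x == c) cs
            simp at hl; omega
          rw [runsBAux, runsBAux, ih _ hd, ih _ hd (([]) ++ _)]
          simp

theorem runsB_nil : runsB [] = [] := by
  unfold runsB
  rw [runsBAux]

theorem runsB_cons (c : Char) (cs : List Char) :
    runsB (c :: cs)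
      = ((1 : Int) + (cs.takeWhile (fun x => x == c)).length)
          :: runsB (cs.dropWhile (fun x => x == c)) := by
  unfold runsB
  rw [runsBAux, runsBAux_acc (cs.dropWhile (fun x => x == c)).length _ le_rfl]
  simp

-- structural form of A's index loop: walk the tail carrying the previous character
def loopAdj (st : Int × List Int) (prev : Char) : List Char → Int × List Int
  | [] => st
  | c :: rest =>
      loopAdj (if c == prev then (st.1, incLast st.2) else (st.1 + 1, st.2 ++ [st.1 + 1])) c rest

-- add d to the last element
def addLast (d : Int) : List Int → List Int
  | [] => []
  | [x] => [x + d]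
  | x :: y :: xs => x :: addLast d (y :: xs)

-- A's pattern encoding as a function of the run lengths: k-th run (0-based, offset j) ↦ j + k + r_k - 1
def enc (j : Int) : List Int → List Int
  | [] => []
  | r :: rs => (j + r - 1) :: enc (j + 1) rs

theorem addLast_zero (p : List Int) : addLast 0 p = p := by
  induction p with
  | nil => rfl
  | cons x xs ih =>
      cases xs with
      | nil => simp [addLast]
      | cons y ys => simpa [addLast] using ih

theorem addLast_ne_nil (d : Int) (p : List Int) (h : p ≠ []) : addLast d p ≠ [] := by
  cases p with
  | nil => exact absurd rfl h
  | cons x xs => cases xs <;> simp [addLast]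

theorem addLast_cons (d x : Int) (p : List Int) (h : p ≠ []) :
    addLast d (x :: p) = x :: addLast d p := by
  cases p with
  | nil => exact absurd rfl h
  | cons y ys => rfl

theorem addLast_addLast (d e : Int) (p : List Int) :
    addLast e (addLast d p) = addLast (d + e) p := by
  induction p with
  | nil => rfl
  | cons x xs ih =>
      cases xs with
      | nil => simp [addLast]; ring
      | cons y ys =>
          rw [addLast_cons d x _ (by simp), addLast_cons e x _ (addLast_ne_nil d _ (by simp)),
            addLast_cons (d + e) x _ (by simp), ih]

theorem incLast_eq_addLast (p : List Int) : incLast p = addLast 1 p := by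
  induction p with
  | nil => rfl
  | cons x xs ih =>
      cases xs with
      | nil => rfl
      | cons y ys => simpa [incLast, addLast] using ih

theorem addLast_append (p : List Int) (x d : Int) :
    addLast d (p ++ [x]) = p ++ [x + d] := by
  induction p with
  | nil => rfl
  | cons a as ih =>
      cases as with
      | nil => simp [addLast]
      | cons b bs => simpa [addLast] using ih

theorem loopAdj_eq_enc (rest : List Char) :
    ∀ (prev : Char) (j : Int) (p : List Int), p ≠ [] →
      (loopAdj (j, p) prev rest).2
        = addLast ((runsB (prev :: rest)).headD 0 - 1) p ++ enc (j + 1) ((runsB (prev :: rest)).tail) := by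
  induction rest with
  | nil =>
      intro prev j p hp
      simp [loopAdj, runsB_cons, runsB_nil, enc, addLast_zero]
  | cons c rest' ih =>
      intro prev j p hp
      by_cases hc : c = prev
      · subst hc
        rw [loopAdj]
        simp only [beq_self_eq_true, if_pos]
        rw [ih c j (incLast p) (by rw [incLast_eq_addLast]; exact addLast_ne_nil 1 p hp)]
        rw [incLast_eq_addLast, addLast_addLast]
        simp [runsB_cons]
        rw [add_comm]
      · rw [loopAdj]
        simp only [beq_iff_eq, hc, if_false]
        rw [ih c (j+1) (p ++ [j+1]) (by simp)]
        rw [addLast_append]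
        simp [runsB_cons, hc, addLast_zero, enc]
        ring

theorem pyGet?_cons_shift (a : Char) (cs : List Char) (i : Int) (hi : 0 ≤ i) :
    PySem.List.pyGet? (a :: cs) (i + 1) = PySem.List.pyGet? cs i := by
  rw [PySem.List.pyGet?_of_nonneg (a :: cs) (by omega), PySem.List.pyGet?_of_nonneg cs hi]
  have : (i + 1).toNat = i.toNat + 1 := by omega
  rw [this, List.getElem?_cons_succ]

theorem stepA_shift (a : Char) (cs : List Char) (st : Int × List Int) (i : Int) (hi : 1 ≤ i) :
    stepA (a :: cs) st (i + 1) = stepA cs st i := by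
  unfold stepA
  rw [pyGet?_cons_shift a cs i (by omega), show i + 1 - 1 = (i - 1) + 1 by ring,
    pyGet?_cons_shift a cs (i - 1) (by omega)]

theorem fold_shift (cs : List Char) (a : Char) (m : Int) (st : Int × List Int) :
    (PySem.List.pyRange 2 m 1).foldl (stepA (a :: cs)) st
      = (PySem.List.pyRange 1 (m - 1) 1).foldl (stepA cs) st := by
  rw [PySem.List.pyRange_one 2 m, PySem.List.pyRange_one 1 (m - 1)]
  have h : (m - 2).toNat = (m - 1 - 1).toNat := by omega
  rw [List.foldl_map, List.foldl_map, ← h]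
  have hfun : (fun (st : Int × List Int) (k : Nat) => stepA (a :: cs) st (2 + (k : Int)))
      = fun (st : Int × List Int) (k : Nat) => stepA cs st (1 + (k : Int)) := by
    funext st' k
    rw [show (2 : Int) + (k : Int) = (1 + (k : Int)) + 1 by ring]
    exact stepA_shift a cs st' (1 + (k : Int)) (by omega)
  rw [hfun]

theorem fold_eq_loopAdj (cs : List Char) :
    ∀ (a : Char) (st : Int × List Int),
      (PySem.List.pyRange 1 (((a :: cs).length : Int)) 1).foldl (stepA (a :: cs)) st
        = loopAdj st a cs := by
  induction cs with
  | nil => intro a st; simp [PySem.List.pyRange_one_eq_nil (by norm_num : (1:Int) ≤ 1), loopAdj]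
  | cons b t ih =>
      intro a st
      rw [PySem.List.pyRange_one_cons (by simp), List.foldl_cons,
        show (1 : Int) + 1 = 2 from rfl, fold_shift (b :: t) a]
      have hlen : ((a :: b :: t).length : Int) - 1 = ((b :: t).length : Int) := by simp
      rw [hlen, ih b]
      have hstep : stepA (a :: b :: t) st 1
          = if b == a then (st.1, incLast st.2) else (st.1 + 1, st.2 ++ [st.1 + 1]) := by
        unfold stepA
        rw [show (1:Int) - 1 = 0 by ring, PySem.List.pyGet?_zero_cons,
          show (1:Int) = (0:Int) + 1 by ring, pyGet?_cons_shift a (b :: t) 0 (le_refl 0),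
          PySem.List.pyGet?_zero_cons]
        simp
      rw [hstep, loopAdj]

theorem pattern_eq_enc (a : Char) (cs : List Char) :
    ((PySem.List.pyRange 1 (((a :: cs).length : Int)) 1).foldl (stepA (a :: cs)) (1, [1])).2
      = enc 1 (runsB (a :: cs)) := by
  rw [fold_eq_loopAdj cs a (1, [1]),
    loopAdj_eq_enc cs a 1 [1] (by simp)]
  cases hrb : runsB (a :: cs) with
  | nil => rw [runsB_cons] at hrb; simp at hrb
  | cons r rs =>
      simp only [List.headD_cons, List.tail_cons, addLast, enc]
      rw [show (1 : Int) + (r - 1) = 1 + r - 1 by ring]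
      rfl

theorem enc_inj (rs : List Int) : ∀ (rs' : List Int) (j : Int), enc j rs = enc j rs' → rs = rs' := by
  induction rs with
  | nil =>
      intro rs' j h
      cases rs' with
      | nil => rfl
      | cons r t => simp [enc] at h
  | cons r t ih =>
      intro rs' j h
      cases rs' with
      | nil => simp [enc] at h
      | cons r' t' =>
          simp [enc] at h
          obtain ⟨h1, h2⟩ := h
          rw [show r = r' by omega, ih t' (j + 1) h2]

theorem pattern_iff_runs (s t : List Char) (hlen : s.length = t.length) :
    (((PySem.List.pyRange 1 ((s.length : Int)) 1).foldl (stepA s) (1, [1])).2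
      = ((PySem.List.pyRange 1 ((t.length : Int)) 1).foldl (stepA t) (1, [1])).2)
    ↔ runsB s = runsB t := by
  cases s with
  | nil =>
      cases t with
      | nil => simp
      | cons b ds => simp at hlen
  | cons a cs =>
      cases t with
      | nil => simp at hlen
      | cons b ds =>
          rw [pattern_eq_enc a cs, pattern_eq_enc b ds]
          exact ⟨fun h => enc_inj _ _ 1 h, fun h => by rw [h]⟩

-- ===== B side: the adjacency check, structurally =====
def sameAdj : Char → List Char → Char → List Char → Bool
  | _, [], _, [] => true
  | a, c :: cs, b, d :: ds => (((c == a) == (d == b)) && sameAdj c cs d ds)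
  | _, _, _, _ => false

theorem runsB_cons_same (a c : Char) (cs : List Char) (h : (c == a) = true) :
    runsB (a :: c :: cs)
      = ((runsB (c :: cs)).headD 0 + 1) :: (runsB (c :: cs)).tail := by
  have : c = a := by simpa using h
  subst this
  rw [runsB_cons c (c :: cs), runsB_cons c cs]
  simp
  ring

theorem runsB_cons_ne (a c : Char) (cs : List Char) (h : (c == a) = false) :
    runsB (a :: c :: cs) = 1 :: runsB (c :: cs) := by
  rw [runsB_cons a (c :: cs)]
  simp [h]

theorem runs_iff_sameAdj :
    ∀ (cs ds : List Char) (a b : Char), cs.length = ds.length →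
      (sameAdj a cs b ds = true ↔ runsB (a :: cs) = runsB (b :: ds)) := by
  intro cs
  induction cs with
  | nil =>
      intro ds a b hlen
      cases ds with
      | nil => simp [sameAdj, runsB_cons, runsB_nil]
      | cons d ds' => simp at hlen
  | cons c cs' ih =>
      intro ds a b hlen
      cases ds with
      | nil => simp at hlen
      | cons d ds' =>
          have hlen' : cs'.length = ds'.length := by simpa using hlen
          obtain ⟨r, rs, hr, hr1⟩ : ∃ r rs, runsB (c :: cs') = r :: rs ∧ 1 ≤ r :=
            ⟨_, _, runsB_cons c cs', by omega⟩
          obtain ⟨r', rs', hr', hr1'⟩ : ∃ r' rs', runsB (d :: ds') = r' :: rs' ∧ 1 ≤ r' :=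
            ⟨_, _, runsB_cons d ds', by omega⟩
          cases hca : (c == a) <;> cases hdb : (d == b)
          · rw [runsB_cons_ne a c cs' hca, runsB_cons_ne b d ds' hdb]
            simp [sameAdj, hca, hdb, ih ds' c d hlen']
          · rw [runsB_cons_ne a c cs' hca, runsB_cons_same b d ds' hdb, hr']
            simp [sameAdj, hca, hdb]
            intro h; omega
          · rw [runsB_cons_same a c cs' hca, runsB_cons_ne b d ds' hdb, hr]
            simp [sameAdj, hca, hdb]
            intro h; omega
          · rw [runsB_cons_same a c cs' hca, runsB_cons_same b d ds' hdb, hr, hr']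
            simp [sameAdj, hca, hdb]
            rw [ih ds' c d hlen', hr, hr']
            simp

theorem stepB_shift (a b : Char) (cs ds : List Char) (i : Int) (hi : 1 ≤ i) :
    stepB (a :: cs) (b :: ds) (i + 1) = stepB cs ds i := by
  unfold stepB
  rw [pyGet?_cons_shift a cs i (by omega), show i + 1 - 1 = (i - 1) + 1 by ring,
    pyGet?_cons_shift a cs (i - 1) (by omega),
    pyGet?_cons_shift b ds i (by omega), pyGet?_cons_shift b ds (i - 1) (by omega)]

theorem all_shift (cs ds : List Char) (a b : Char) (m : Int) :
    (PySem.List.pyRange 2 m 1).all (stepB (a :: cs) (b :: ds))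
      = (PySem.List.pyRange 1 (m - 1) 1).all (stepB cs ds) := by
  rw [PySem.List.pyRange_one 2 m, PySem.List.pyRange_one 1 (m - 1)]
  have h : (m - 2).toNat = (m - 1 - 1).toNat := by omega
  rw [List.all_map, List.all_map, ← h]
  congr 1
  funext k
  show stepB (a :: cs) (b :: ds) (2 + (k : Int)) = stepB cs ds (1 + (k : Int))
  rw [show (2 : Int) + (k : Int) = (1 + (k : Int)) + 1 by ring]
  exact stepB_shift a b cs ds (1 + (k : Int)) (by omega)

theorem all_eq_sameAdj :
    ∀ (cs ds : List Char) (a b : Char), cs.length = ds.length →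
      (PySem.List.pyRange 1 (((a :: cs).length : Int)) 1).all (stepB (a :: cs) (b :: ds))
        = sameAdj a cs b ds := by
  intro cs
  induction cs with
  | nil =>
      intro ds a b hlen
      cases ds with
      | nil => simp [PySem.List.pyRange_one_eq_nil (by norm_num : (1:Int) ≤ 1), sameAdj]
      | cons d ds' => simp at hlen
  | cons c cs' ih =>
      intro ds a b hlen
      cases ds with
      | nil => simp at hlen
      | cons d ds' =>
          have hlen' : cs'.length = ds'.length := by simpa using hlen
          rw [PySem.List.pyRange_one_cons (by simp), List.all_cons,
            show (1 : Int) + 1 = 2 from rfl, all_shift (c :: cs') (d :: ds') a b]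
          have hl : ((a :: c :: cs').length : Int) - 1 = ((c :: cs').length : Int) := by simp
          rw [hl, ih ds' c d hlen']
          have hstep : stepB (a :: c :: cs') (b :: d :: ds') 1 = ((c == a) == (d == b)) := by
            unfold stepB
            rw [show (1:Int) - 1 = 0 by ring, PySem.List.pyGet?_zero_cons,
              show (1:Int) = (0:Int) + 1 by ring, pyGet?_cons_shift a (c :: cs') 0 (le_refl 0),
              pyGet?_cons_shift b (d :: ds') 0 (le_refl 0),
              PySem.List.pyGet?_zero_cons, PySem.List.pyGet?_zero_cons]
            simp
          rw [hstep]
          rfl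

theorem main : ∀ (arr : List String) (matchstr : String),
    findSpecificPattern1 arr matchstr = findSpecificPattern1_alt arr matchstr := by
  intro arr m
  show (arr.foldl _ []) = arr.filter _
  rw [show (fun (out : List String) el =>
      if ¬ (PySem.Str.len el == PySem.Str.len m) then out
      else if getPattern m (PySem.Str.len m) == getPattern el (PySem.Str.len m) then out ++ [el]
      else out)
    = fun out el =>
      if (PySem.Str.len el == PySem.Str.len m
          && (getPattern m (PySem.Str.len m) == getPattern el (PySem.Str.len m))) then out ++ [el]
      else out by
      funext out el
      cases hb : (PySem.Str.len el == PySem.Str.len m) <;> simp]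
  rw [PySem.List.foldl_append_if_eq_filter, List.nil_append]
  apply List.filter_congr
  intro el _
  cases hb : (PySem.Str.len el == PySem.Str.len m)
  · simp
  · simp only [Bool.true_and]
    have hlen : m.toList.length = el.toList.length := by
      simp only [beq_iff_eq, PySem.Str.len_eq, Nat.cast_inj] at hb
      exact hb.symm
    have e1 : getPattern m (PySem.Str.len m)
        = ((PySem.List.pyRange 1 ((m.toList.length : Int)) 1).foldl (stepA m.toList) (1, [1])).2 := by
      simp only [getPattern, PySem.Str.len_eq]
    have e2 : getPattern el (PySem.Str.len m)
        = ((PySem.List.pyRange 1 ((el.toList.length : Int)) 1).foldl (stepA el.toList) (1, [1])).2 := by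
      simp only [getPattern, PySem.Str.len_eq, hlen]
    have eB : (PySem.List.pyRange 1 (PySem.Str.len m) 1).all (stepB el.toList m.toList)
        = (PySem.List.pyRange 1 ((el.toList.length : Int)) 1).all (stepB el.toList m.toList) := by
      simp only [PySem.Str.len_eq, hlen]
    rw [Bool.eq_iff_iff]
    simp only [beq_iff_eq]
    rw [e1, e2, pattern_iff_runs m.toList el.toList hlen, eB]
    cases cel : el.toList with
    | nil =>
        cases cm : m.toList with
        | nil =>
            simp [runsB_nil, PySem.List.pyRange_one_eq_nil (by norm_num : (0:Int) ≤ 1)]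
        | cons x xs => rw [cel, cm] at hlen; simp at hlen
    | cons a cs =>
        cases cm : m.toList with
        | nil => rw [cel, cm] at hlen; simp at hlen
        | cons b ds =>
            have hlen' : cs.length = ds.length := by
              rw [cel, cm] at hlen; simpa using hlen.symm
            rw [all_eq_sameAdj cs ds a b hlen']
            exact ⟨fun h => (runs_iff_sameAdj cs ds a b hlen').mpr h.symm,
              fun h => ((runs_iff_sameAdj cs ds a b hlen').mp h).symm⟩

-- ===== VERDICT (by name: the statement is the Claim_ definition above) =====
theorem findSpecificPattern1_spec : Claim_equal_findSpecificPattern1 := by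
  intro arr matchstr _
  exact main arr matchstr
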